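-- pv_equiv track=rewrite | github.com/atharvasonawane/ai_audit_new_approach | audit_tool/task7/issue_detector.py | evaluate_risk_level
-- ===== SOURCE A (Python) =====
-- def evaluate_risk_level(file_flags, ui_defects, accessibility_defects):
--     """
--     Evaluates the risk level based on the combination of architectural flags
--     and defect severities.
--     """
--     flag_names = set(f.get("flag_name", "") for f in file_flags)
--
--     # Collect severities across UI and Accessibility, ensuring uppercase for comparison
--     severities = set()
--     for d in ui_defects:
--         sev = d.get("severity", "").upper()
--         if sev: severities.add(sev)
--     for d in accessibility_defects:
--         sev = d.get("severity", "").upper()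
--         if sev: severities.add(sev)
--
--     # 1. CRITICAL
--     if "CRITICAL" in severities or \
--        "MONOLITH_COMPONENT" in flag_names or \
--        "EXCESSIVE_API_USAGE" in flag_names:
--         return "CRITICAL"
--
--     # 2. HIGH
--     if "HIGH" in severities or \
--        "VERY_LARGE_COMPONENT" in flag_names or \
--        "CRITICAL_COMPONENT" in flag_names:
--         return "HIGH"
--
--     # 3. MEDIUM
--     if "MEDIUM" in severities or \
--        "LARGE_COMPONENT" in flag_names or \
--        "MANY_METHODS" in flag_names:
--         return "MEDIUM"
--
--     # 4. LOW
--     if "LOW" in severities: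
--         return "LOW"
--
--     # 5. CLEAN (fallback)
--     return "CLEAN"
-- ===== SOURCE B (Python) =====
-- _FLAG_RANK = {"MONOLITH_COMPONENT": 4, "EXCESSIVE_API_USAGE": 4,
--               "VERY_LARGE_COMPONENT": 3, "CRITICAL_COMPONENT": 3,
--               "LARGE_COMPONENT": 2, "MANY_METHODS": 2}
-- _SEV_RANK = {"CRITICAL": 4, "HIGH": 3, "MEDIUM": 2, "LOW": 1}
-- _LEVELS = ["CLEAN", "LOW", "MEDIUM", "HIGH", "CRITICAL"]
--
--
-- def evaluate_risk_level(file_flags, ui_defects, accessibility_defects):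
--     """Maximum-severity reduction: rank every flag and severity, keep the worst."""
--     worst = 0
--     for f in file_flags:
--         worst = max(worst, _FLAG_RANK.get(f.get("flag_name", ""), 0))
--     for d in ui_defects + accessibility_defects:
--         worst = max(worst, _SEV_RANK.get(d.get("severity", "").upper(), 0))
--     return _LEVELS[worst]
-- ===== Notes on version B (the rewrite author's own statement) =====
-- stated objective: alternative
-- what changed: Replaces the ordered short-circuit membership tests over two built sets by a single max-reduction: two rank dicts map each trigger flag name / severity to an integer rank, one pass keeps the worst rank, and a table maps it back to the level string.
import Mathlib
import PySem

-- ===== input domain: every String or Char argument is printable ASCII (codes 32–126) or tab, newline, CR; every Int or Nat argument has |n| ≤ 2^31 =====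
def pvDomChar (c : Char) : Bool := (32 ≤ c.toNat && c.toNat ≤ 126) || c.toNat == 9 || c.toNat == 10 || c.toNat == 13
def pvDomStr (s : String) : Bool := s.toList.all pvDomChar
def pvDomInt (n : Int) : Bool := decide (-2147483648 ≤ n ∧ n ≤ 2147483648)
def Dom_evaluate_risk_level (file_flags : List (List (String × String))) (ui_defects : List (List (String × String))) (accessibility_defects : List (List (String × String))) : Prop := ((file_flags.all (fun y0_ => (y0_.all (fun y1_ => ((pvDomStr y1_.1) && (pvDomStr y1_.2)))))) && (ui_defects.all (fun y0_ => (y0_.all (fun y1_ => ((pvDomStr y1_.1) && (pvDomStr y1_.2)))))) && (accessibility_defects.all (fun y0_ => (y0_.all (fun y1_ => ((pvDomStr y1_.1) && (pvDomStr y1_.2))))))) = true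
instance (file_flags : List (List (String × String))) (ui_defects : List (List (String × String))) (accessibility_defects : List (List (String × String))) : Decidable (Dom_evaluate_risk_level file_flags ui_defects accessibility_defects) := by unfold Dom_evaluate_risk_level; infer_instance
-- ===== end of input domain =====

-- B replaces A's ordered membership tests over two built sets by a max-reduction over rank tables (alternative decomposition, same cost).


-- ===== PORT A =====
-- A-side helper: one iteration of A's severity-collecting loop body
def pvSevStep (s : PySem.Set String) (d : List (String × String)) : PySem.Set String :=
  let sev := PySem.Str.upper (PySem.Dict.getD (PySem.Dict.ofList d) "severity" "")
  if sev ≠ "" then PySem.Set.add s sev else s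

def evaluate_risk_level (file_flags : List (List (String × String))) (ui_defects : List (List (String × String))) (accessibility_defects : List (List (String × String))) : String :=
  let flag_names : PySem.Set String :=
    PySem.Set.ofList (file_flags.map (fun f => PySem.Dict.getD (PySem.Dict.ofList f) "flag_name" ""))
  let severities : PySem.Set String := ui_defects.foldl pvSevStep []
  let severities : PySem.Set String := accessibility_defects.foldl pvSevStep severities
  if PySem.Set.contains severities "CRITICAL" ||
     PySem.Set.contains flag_names "MONOLITH_COMPONENT" ||
     PySem.Set.contains flag_names "EXCESSIVE_API_USAGE" then "CRITICAL"
  else if PySem.Set.contains severities "HIGH" ||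
     PySem.Set.contains flag_names "VERY_LARGE_COMPONENT" ||
     PySem.Set.contains flag_names "CRITICAL_COMPONENT" then "HIGH"
  else if PySem.Set.contains severities "MEDIUM" ||
     PySem.Set.contains flag_names "LARGE_COMPONENT" ||
     PySem.Set.contains flag_names "MANY_METHODS" then "MEDIUM"
  else if PySem.Set.contains severities "LOW" then "LOW"
  else "CLEAN"

-- ===== PORT B =====
def pvFlagRank : PySem.Dict String Nat :=
  PySem.Dict.ofList [("MONOLITH_COMPONENT", 4), ("EXCESSIVE_API_USAGE", 4),
                     ("VERY_LARGE_COMPONENT", 3), ("CRITICAL_COMPONENT", 3),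
                     ("LARGE_COMPONENT", 2), ("MANY_METHODS", 2)]
def pvSevRank : PySem.Dict String Nat :=
  PySem.Dict.ofList [("CRITICAL", 4), ("HIGH", 3), ("MEDIUM", 2), ("LOW", 1)]
def pvLevels : List String := ["CLEAN", "LOW", "MEDIUM", "HIGH", "CRITICAL"]

def evaluate_risk_level_alt (file_flags : List (List (String × String))) (ui_defects : List (List (String × String))) (accessibility_defects : List (List (String × String))) : String :=
  let worst : Nat := file_flags.foldl
    (fun w f => max w (pvFlagRank.getD (PySem.Dict.getD (PySem.Dict.ofList f) "flag_name" "") 0)) 0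
  let worst : Nat := (ui_defects ++ accessibility_defects).foldl
    (fun w d => max w (pvSevRank.getD (PySem.Str.upper (PySem.Dict.getD (PySem.Dict.ofList d) "severity" "")) 0)) worst
  -- _LEVELS[worst]: worst is always ≤ 4, inside the 5-element table, so plain getD is exact
  pvLevels.getD worst "CLEAN"

-- ===== PRECONDITION & SPEC =====
def Spec_evaluate_risk_level (file_flags : List (List (String × String))) (ui_defects : List (List (String × String))) (accessibility_defects : List (List (String × String))) (out : String) : Prop := out = evaluate_risk_level_alt file_flags ui_defects accessibility_defects
instance (file_flags : List (List (String × String))) (ui_defects : List (List (String × String))) (accessibility_defects : List (List (String × String))) (out : String) : Decidable (Spec_evaluate_risk_level file_flags ui_defects accessibility_defects out) := by unfold Spec_evaluate_risk_level; infer_instance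

-- ===== CLAIM (what is proved, stated in full; the proofs are below) =====
def Claim_equal_evaluate_risk_level : Prop := ∀ (file_flags : List (List (String × String))) (ui_defects : List (List (String × String))) (accessibility_defects : List (List (String × String))), Dom_evaluate_risk_level file_flags ui_defects accessibility_defects → Spec_evaluate_risk_level file_flags ui_defects accessibility_defects (evaluate_risk_level file_flags ui_defects accessibility_defects)

-- ===== LEMMAS AND PROOFS =====


-- abbreviations for the values both ports extract from each record
def pvFlagName (f : List (String × String)) : String := (PySem.Dict.ofList f).getD "flag_name" ""
def pvSevOf (d : List (String × String)) : String := PySem.Str.upper ((PySem.Dict.ofList d).getD "severity" "")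
def pvFR (y : String) : Nat := pvFlagRank.getD y 0
def pvSR (y : String) : Nat := pvSevRank.getD y 0
def pvW (file_flags ui_defects accessibility_defects : List (List (String × String))) : Nat :=
  (ui_defects ++ accessibility_defects).foldl (fun w d => max w (pvSR (pvSevOf d)))
    (file_flags.foldl (fun w f => max w (pvFR (pvFlagName f))) 0)
def pvFCb (ff : List (List (String × String))) (y : String) : Bool := ff.any (fun f => pvFlagName f == y)
def pvSCb (ud ad : List (List (String × String))) (y : String) : Bool :=
  (ud ++ ad).any (fun d => pvSevOf d == y)

lemma pvFR_cases (y : String) : pvFR y =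
    if y = "MANY_METHODS" then 2 else if y = "LARGE_COMPONENT" then 2
    else if y = "CRITICAL_COMPONENT" then 3 else if y = "VERY_LARGE_COMPONENT" then 3
    else if y = "EXCESSIVE_API_USAGE" then 4 else if y = "MONOLITH_COMPONENT" then 4 else 0 := by
  simp [pvFR, pvFlagRank, PySem.Dict.ofList, PySem.Dict.update, PySem.Dict.getD_insert,
        PySem.Dict.getD_empty, List.foldl]

lemma pvSR_cases (y : String) : pvSR y =
    if y = "LOW" then 1 else if y = "MEDIUM" then 2
    else if y = "HIGH" then 3 else if y = "CRITICAL" then 4 else 0 := by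
  simp [pvSR, pvSevRank, PySem.Dict.ofList, PySem.Dict.update, PySem.Dict.getD_insert,
        PySem.Dict.getD_empty, List.foldl]

lemma mem_foldl_sevStep (L : List (List (String × String))) (s : PySem.Set String) (y : String) :
    y ∈ L.foldl pvSevStep s ↔ y ∈ s ∨ ∃ d ∈ L, pvSevOf d = y ∧ y ≠ "" := by
  induction L generalizing s with
  | nil => simp
  | cons d t ih =>
    simp only [List.foldl_cons, ih, pvSevStep, pvSevOf]
    split_ifs with h
    · simp only [PySem.Set.mem_add, List.mem_cons]
      constructor
      · rintro ((hs | rfl) | hr)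
        · exact Or.inl hs
        · exact Or.inr ⟨d, Or.inl rfl, rfl, h⟩
        · rcases hr with ⟨e, he, hv⟩; exact Or.inr ⟨e, Or.inr he, hv⟩
      · rintro (hs | ⟨e, (rfl | he), hv, hy⟩)
        · exact Or.inl (Or.inl hs)
        · exact Or.inl (Or.inr hv.symm)
        · exact Or.inr ⟨e, he, hv, hy⟩
    · rw [not_ne_iff] at h
      simp only [List.mem_cons]
      constructor
      · rintro (hs | ⟨e, he, hv⟩)
        · exact Or.inl hs
        · exact Or.inr ⟨e, Or.inr he, hv⟩
      · rintro (hs | ⟨e, (rfl | he), hv, hy⟩)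
        · exact Or.inl hs
        · exact absurd (hv.symm.trans h) hy
        · exact Or.inr ⟨e, he, hv, hy⟩

lemma sev_contains_eq (ud ad : List (List (String × String))) (y : String) (hy : y ≠ "") :
    PySem.Set.contains (ad.foldl pvSevStep (ud.foldl pvSevStep [])) y = pvSCb ud ad y := by
  rw [Bool.eq_iff_iff, PySem.Set.contains_iff, mem_foldl_sevStep, mem_foldl_sevStep]
  simp [pvSCb, hy]

lemma flag_contains_eq (ff : List (List (String × String))) (y : String) :
    PySem.Set.contains (PySem.Set.ofList (ff.map (fun f => (PySem.Dict.ofList f).getD "flag_name" ""))) y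
      = pvFCb ff y := by
  rw [Bool.eq_iff_iff, PySem.Set.contains_iff, PySem.Set.mem_ofList]
  simp only [pvFCb, pvFlagName, List.mem_map, List.any_eq_true, beq_iff_eq]

lemma A_char (ff ud ad : List (List (String × String))) : evaluate_risk_level ff ud ad =
    if pvSCb ud ad "CRITICAL" || pvFCb ff "MONOLITH_COMPONENT" || pvFCb ff "EXCESSIVE_API_USAGE" then "CRITICAL"
    else if pvSCb ud ad "HIGH" || pvFCb ff "VERY_LARGE_COMPONENT" || pvFCb ff "CRITICAL_COMPONENT" then "HIGH"
    else if pvSCb ud ad "MEDIUM" || pvFCb ff "LARGE_COMPONENT" || pvFCb ff "MANY_METHODS" then "MEDIUM"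
    else if pvSCb ud ad "LOW" then "LOW"
    else "CLEAN" := by
  unfold evaluate_risk_level
  dsimp only
  rw [sev_contains_eq ud ad "CRITICAL" (by decide), sev_contains_eq ud ad "HIGH" (by decide),
      sev_contains_eq ud ad "MEDIUM" (by decide), sev_contains_eq ud ad "LOW" (by decide),
      flag_contains_eq, flag_contains_eq, flag_contains_eq, flag_contains_eq,
      flag_contains_eq, flag_contains_eq]

lemma foldl_max_le_iff {A : Type} (g : A → Nat) (l : List A) (a b : Nat) :
    l.foldl (fun w x => max w (g x)) a ≤ b ↔ a ≤ b ∧ ∀ x ∈ l, g x ≤ b := by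
  induction l generalizing a with
  | nil => simp
  | cons x t ih => simp [ih]; tauto

lemma pvW_le_iff (ff ud ad : List (List (String × String))) (b : Nat) :
    pvW ff ud ad ≤ b ↔ (∀ f ∈ ff, pvFR (pvFlagName f) ≤ b) ∧ (∀ d ∈ ud ++ ad, pvSR (pvSevOf d) ≤ b) := by
  unfold pvW
  rw [foldl_max_le_iff, foldl_max_le_iff]
  constructor
  · rintro ⟨⟨-, h1⟩, h2⟩; exact ⟨h1, h2⟩
  · rintro ⟨h1, h2⟩; exact ⟨⟨Nat.zero_le _, h1⟩, h2⟩

lemma le_pvW_flag (ff ud ad : List (List (String × String))) (f : List (String × String))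
    (hf : f ∈ ff) : pvFR (pvFlagName f) ≤ pvW ff ud ad :=
  le_trans ((PySem.List.le_foldl_max_nat ff (fun f => pvFR (pvFlagName f)) 0).2 f hf)
    ((PySem.List.le_foldl_max_nat (ud ++ ad) (fun d => pvSR (pvSevOf d)) _).1)

lemma le_pvW_sev (ff ud ad : List (List (String × String))) (d : List (String × String))
    (hd : d ∈ ud ++ ad) : pvSR (pvSevOf d) ≤ pvW ff ud ad :=
  (PySem.List.le_foldl_max_nat (ud ++ ad) (fun d => pvSR (pvSevOf d)) _).2 d hd

lemma pvSCb_true {ud ad : List (List (String × String))} {y : String}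
    (h : pvSCb ud ad y = true) : ∃ d ∈ ud ++ ad, pvSevOf d = y := by
  simp only [pvSCb, List.any_eq_true, beq_iff_eq] at h
  exact h

lemma pvSCb_false {ud ad : List (List (String × String))} {y : String}
    (h : pvSCb ud ad y = false) : ∀ d ∈ ud ++ ad, pvSevOf d ≠ y := by
  simp only [pvSCb, List.any_eq_false, beq_iff_eq] at h
  exact h

lemma pvFCb_true {ff : List (List (String × String))} {y : String}
    (h : pvFCb ff y = true) : ∃ f ∈ ff, pvFlagName f = y := by
  simp only [pvFCb, List.any_eq_true, beq_iff_eq] at h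
  exact h

lemma pvFCb_false {ff : List (List (String × String))} {y : String}
    (h : pvFCb ff y = false) : ∀ f ∈ ff, pvFlagName f ≠ y := by
  simp only [pvFCb, List.any_eq_false, beq_iff_eq] at h
  exact h

theorem evaluate_risk_level_spec : Claim_equal_evaluate_risk_level := by
  intro ff ud ad _
  show evaluate_risk_level ff ud ad = evaluate_risk_level_alt ff ud ad
  have hB : evaluate_risk_level_alt ff ud ad = pvLevels.getD (pvW ff ud ad) "CLEAN" := rfl
  rw [hB, A_char]
  have hW4 : pvW ff ud ad ≤ 4 := (pvW_le_iff ff ud ad 4).mpr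
    ⟨fun f _ => by rw [pvFR_cases]; split_ifs <;> omega,
     fun d _ => by rw [pvSR_cases]; split_ifs <;> omega⟩
  by_cases hc4 : (pvSCb ud ad "CRITICAL" || pvFCb ff "MONOLITH_COMPONENT" || pvFCb ff "EXCESSIVE_API_USAGE") = true
  · rw [if_pos hc4]
    simp only [Bool.or_eq_true] at hc4
    have h4 : 4 ≤ pvW ff ud ad := by
      obtain (hc | hc) | hc := hc4
      · obtain ⟨d, hd, hv⟩ := pvSCb_true hc
        exact le_trans (by decide : (4 : Nat) ≤ pvSR "CRITICAL") (hv ▸ le_pvW_sev ff ud ad d hd)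
      · obtain ⟨f, hf, hv⟩ := pvFCb_true hc
        exact le_trans (by decide : (4 : Nat) ≤ pvFR "MONOLITH_COMPONENT") (hv ▸ le_pvW_flag ff ud ad f hf)
      · obtain ⟨f, hf, hv⟩ := pvFCb_true hc
        exact le_trans (by decide : (4 : Nat) ≤ pvFR "EXCESSIVE_API_USAGE") (hv ▸ le_pvW_flag ff ud ad f hf)
    have hW : pvW ff ud ad = 4 := le_antisymm hW4 h4
    rw [hW]; simp [pvLevels]
  · rw [if_neg hc4]
    rw [Bool.not_eq_true] at hc4
    simp only [Bool.or_eq_false_iff] at hc4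
    obtain ⟨⟨hs4, hfM⟩, hfE⟩ := hc4
    have hup3 : pvW ff ud ad ≤ 3 := (pvW_le_iff ff ud ad 3).mpr
      ⟨fun f hf => by
          rw [pvFR_cases]; split_ifs with h1 h2 h3 h4 h5 h6 <;> try omega
          · exact absurd h5 (pvFCb_false hfE f hf)
          · exact absurd h6 (pvFCb_false hfM f hf),
       fun d hd => by
          rw [pvSR_cases]; split_ifs with h1 h2 h3 h4 <;> try omega
          exact absurd h4 (pvSCb_false hs4 d hd)⟩
    by_cases hc3 : (pvSCb ud ad "HIGH" || pvFCb ff "VERY_LARGE_COMPONENT" || pvFCb ff "CRITICAL_COMPONENT") = true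
    · rw [if_pos hc3]
      simp only [Bool.or_eq_true] at hc3
      have h3 : 3 ≤ pvW ff ud ad := by
        obtain (hc | hc) | hc := hc3
        · obtain ⟨d, hd, hv⟩ := pvSCb_true hc
          exact le_trans (by decide : (3 : Nat) ≤ pvSR "HIGH") (hv ▸ le_pvW_sev ff ud ad d hd)
        · obtain ⟨f, hf, hv⟩ := pvFCb_true hc
          exact le_trans (by decide : (3 : Nat) ≤ pvFR "VERY_LARGE_COMPONENT") (hv ▸ le_pvW_flag ff ud ad f hf)
        · obtain ⟨f, hf, hv⟩ := pvFCb_true hc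
          exact le_trans (by decide : (3 : Nat) ≤ pvFR "CRITICAL_COMPONENT") (hv ▸ le_pvW_flag ff ud ad f hf)
      have hW : pvW ff ud ad = 3 := le_antisymm hup3 h3
      rw [hW]; simp [pvLevels]
    · rw [if_neg hc3]
      rw [Bool.not_eq_true] at hc3
      simp only [Bool.or_eq_false_iff] at hc3
      obtain ⟨⟨hs3, hfV⟩, hfC⟩ := hc3
      have hup2 : pvW ff ud ad ≤ 2 := (pvW_le_iff ff ud ad 2).mpr
        ⟨fun f hf => by
            rw [pvFR_cases]; split_ifs with h1 h2 h3 h4 h5 h6 <;> try omega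
            · exact absurd h3 (pvFCb_false hfC f hf)
            · exact absurd h4 (pvFCb_false hfV f hf)
            · exact absurd h5 (pvFCb_false hfE f hf)
            · exact absurd h6 (pvFCb_false hfM f hf),
         fun d hd => by
            rw [pvSR_cases]; split_ifs with h1 h2 h3 h4 <;> try omega
            · exact absurd h3 (pvSCb_false hs3 d hd)
            · exact absurd h4 (pvSCb_false hs4 d hd)⟩
      by_cases hc2 : (pvSCb ud ad "MEDIUM" || pvFCb ff "LARGE_COMPONENT" || pvFCb ff "MANY_METHODS") = true
      · rw [if_pos hc2]
        simp only [Bool.or_eq_true] at hc2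
        have h2 : 2 ≤ pvW ff ud ad := by
          obtain (hc | hc) | hc := hc2
          · obtain ⟨d, hd, hv⟩ := pvSCb_true hc
            exact le_trans (by decide : (2 : Nat) ≤ pvSR "MEDIUM") (hv ▸ le_pvW_sev ff ud ad d hd)
          · obtain ⟨f, hf, hv⟩ := pvFCb_true hc
            exact le_trans (by decide : (2 : Nat) ≤ pvFR "LARGE_COMPONENT") (hv ▸ le_pvW_flag ff ud ad f hf)
          · obtain ⟨f, hf, hv⟩ := pvFCb_true hc
            exact le_trans (by decide : (2 : Nat) ≤ pvFR "MANY_METHODS") (hv ▸ le_pvW_flag ff ud ad f hf)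
        have hW : pvW ff ud ad = 2 := le_antisymm hup2 h2
        rw [hW]; simp [pvLevels]
      · rw [if_neg hc2]
        rw [Bool.not_eq_true] at hc2
        simp only [Bool.or_eq_false_iff] at hc2
        obtain ⟨⟨hs2, hfL⟩, hfMM⟩ := hc2
        have hup1 : pvW ff ud ad ≤ 1 := (pvW_le_iff ff ud ad 1).mpr
          ⟨fun f hf => by
              rw [pvFR_cases]; split_ifs with h1 h2 h3 h4 h5 h6 <;> try omega
              · exact absurd h1 (pvFCb_false hfMM f hf)
              · exact absurd h2 (pvFCb_false hfL f hf)
              · exact absurd h3 (pvFCb_false hfC f hf)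
              · exact absurd h4 (pvFCb_false hfV f hf)
              · exact absurd h5 (pvFCb_false hfE f hf)
              · exact absurd h6 (pvFCb_false hfM f hf),
           fun d hd => by
              rw [pvSR_cases]; split_ifs with h1 h2 h3 h4 <;> try omega
              · exact absurd h2 (pvSCb_false hs2 d hd)
              · exact absurd h3 (pvSCb_false hs3 d hd)
              · exact absurd h4 (pvSCb_false hs4 d hd)⟩
        by_cases hc1 : pvSCb ud ad "LOW" = true
        · rw [if_pos hc1]
          have h1 : 1 ≤ pvW ff ud ad := by
            obtain ⟨d, hd, hv⟩ := pvSCb_true hc1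
            exact le_trans (by decide : (1 : Nat) ≤ pvSR "LOW") (hv ▸ le_pvW_sev ff ud ad d hd)
          have hW : pvW ff ud ad = 1 := le_antisymm hup1 h1
          rw [hW]; simp [pvLevels]
        · rw [if_neg hc1]
          rw [Bool.not_eq_true] at hc1
          have hup0 : pvW ff ud ad ≤ 0 := (pvW_le_iff ff ud ad 0).mpr
            ⟨fun f hf => by
                rw [pvFR_cases]; split_ifs with h1 h2 h3 h4 h5 h6 <;> try omega
                · exact absurd h1 (pvFCb_false hfMM f hf)
                · exact absurd h2 (pvFCb_false hfL f hf)
                · exact absurd h3 (pvFCb_false hfC f hf)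
                · exact absurd h4 (pvFCb_false hfV f hf)
                · exact absurd h5 (pvFCb_false hfE f hf)
                · exact absurd h6 (pvFCb_false hfM f hf),
             fun d hd => by
                rw [pvSR_cases]; split_ifs with h1 h2 h3 h4 <;> try omega
                · exact absurd h1 (pvSCb_false hc1 d hd)
                · exact absurd h2 (pvSCb_false hs2 d hd)
                · exact absurd h3 (pvSCb_false hs3 d hd)
                · exact absurd h4 (pvSCb_false hs4 d hd)⟩
          have hW : pvW ff ud ad = 0 := Nat.le_zero.mp hup0
          rw [hW]; simp [pvLevels]
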